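-- pv_equiv track=rewrite | github.com/Oleksii-Lasiichuk/UCU | midtermm/checkers_org.py | decode_checkerboard
-- ===== SOURCE A (Python) =====
-- def decode_checkerboard(content: str) -> list:
--     """
--     Decodes the checkerboard information into a 2D list
--     representing the board with checkers.
--
--     Parameters:
--     -----------
--     content : list[list[str]]
--         The checkerboard information as read from the file, where
--         each inner list contains:
--         [column_label, row_number, square_color, checker_info]
--
--     Returns:
--     --------
--     list[list[tuple[str, str]]]:
--         A 2D list representing the board, where each element is a tuple:
--         (square_color, checker), where 'square_color' is 'b' or 'w',
--         and 'checker' is 'w', 'b', or '' (empty string) for no checker.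
--
--     Example:
--     --------
--     >>> board = [['a', '1', 'B', 'W'], ['b', '1', 'W', 'False'], ['c', '1', 'B', 'False'],\
--  ['a', '2', 'W', 'False'], ['b', '2', 'B', 'B'], ['c', '2', 'W', 'W'],\
--  ['a', '3', 'B', 'False'], ['b', '3', 'W', 'False'], ['c', '3', 'B', 'False']]
--     >>> decode_checkerboard(board)
--     [[('b', 'w'), ('w', ''), ('b', '')], \
-- [('w', ''), ('b', 'b'), ('w', 'w')], \
-- [('b', ''), ('w', ''), ('b', '')]]
--     """
--     board = []
--     counter = 0
--     per_board = []
--     for line in content: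
--         x = line[-2].lower()
--         if line[-1] == "False":
--             y = ''
--         else:
--             y = line[-1].lower()
--         elements = (x, y)
--         per_board.append(elements)
--         counter += 1
--         if counter == 3:
--             board.append(per_board)
--             per_board = []
--             counter = 0
--     return board
-- ===== SOURCE B (Python) =====
-- def decode_checkerboard(content):
--     decoded = [(line[-2].lower(), '' if line[-1] == 'False' else line[-1].lower())
--                for line in content]
--     board = []
--     while len(decoded) >= 3:
--         board.append(decoded[:3])
--         decoded = decoded[3:]
--     return board
-- ===== Notes on version B (the rewrite author's own statement) =====
-- stated objective: simpler
-- what changed: B decodes all lines into a flat list in one comprehension, then groups it into rows of three with a slicing loop, replacing A's single interleaved loop that maintains a counter and a partial row; a trailing group of fewer than three decoded lines is dropped exactly as in A.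
import Mathlib
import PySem

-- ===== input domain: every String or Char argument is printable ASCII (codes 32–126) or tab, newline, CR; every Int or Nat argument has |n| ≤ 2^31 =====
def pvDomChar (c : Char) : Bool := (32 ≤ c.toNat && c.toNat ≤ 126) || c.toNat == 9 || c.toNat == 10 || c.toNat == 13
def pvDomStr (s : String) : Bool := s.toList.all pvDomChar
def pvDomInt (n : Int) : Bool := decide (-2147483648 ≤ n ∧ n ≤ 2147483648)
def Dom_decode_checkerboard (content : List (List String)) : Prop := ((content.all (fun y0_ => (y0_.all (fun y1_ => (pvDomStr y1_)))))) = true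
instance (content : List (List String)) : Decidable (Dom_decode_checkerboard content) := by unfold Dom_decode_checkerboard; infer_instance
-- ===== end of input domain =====

-- B decodes all lines in one pass, then groups into rows of three by slicing (simpler two-phase
-- decomposition, same cost); A and B agree on every input where A returns.


-- ===== PORT A =====
-- loop state: (board, counter, per_board); line[-2]/line[-1] are pyGetD, valid under Pre_
def decode_checkerboard (content : List (List String)) : List (List (String × String)) :=
  (content.foldl
    (fun (s : List (List (String × String)) × Int × List (String × String)) line =>
      let x := PySem.Str.lower (PySem.List.pyGetD line (-2) "")
      let y := if PySem.List.pyGetD line (-1) "" = "False" then ""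
               else PySem.Str.lower (PySem.List.pyGetD line (-1) "")
      let per := s.2.2 ++ [(x, y)]
      let counter := s.2.1 + 1
      if counter = 3 then (s.1 ++ [per], 0, ([] : List (String × String)))
      else (s.1, counter, per))
    ([], 0, [])).1

-- ===== PORT B =====
def pvDecodeLine (line : List String) : String × String :=
  (PySem.Str.lower (PySem.List.pyGetD line (-2) ""),
   if PySem.List.pyGetD line (-1) "" = "False" then ""
   else PySem.Str.lower (PySem.List.pyGetD line (-1) ""))

-- Source B's while loop: decoded[:3] is take 3, decoded[3:] is drop 3 (exact, nonneg slice bounds)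
def pvChunk3 (xs : List (String × String)) : List (List (String × String)) :=
  if 3 ≤ xs.length then xs.take 3 :: pvChunk3 (xs.drop 3) else []
termination_by xs.length
decreasing_by simp; omega

def decode_checkerboard_alt (content : List (List String)) : List (List (String × String)) :=
  pvChunk3 (content.map pvDecodeLine)

-- ===== PRECONDITION & SPEC =====
-- Pre_ excludes exactly the inputs where A raises IndexError (an inner list with < 2 entries).
def Pre_decode_checkerboard (content : List (List String)) : Prop :=
  ∀ line ∈ content, 2 ≤ line.length
instance (content : List (List String)) : Decidable (Pre_decode_checkerboard content) := by unfold Pre_decode_checkerboard; infer_instance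
def pvWitness_decode_checkerboard : List (List String) :=
  [["a", "1", "B", "W"], ["b", "1", "W", "False"], ["c", "1", "B", "False"], ["a", "2", "W", "B"]]
def Spec_decode_checkerboard (content : List (List String)) (out : List (List (String × String))) : Prop := out = decode_checkerboard_alt content
instance (content : List (List String)) (out : List (List (String × String))) : Decidable (Spec_decode_checkerboard content out) := by unfold Spec_decode_checkerboard; infer_instance

-- ===== CLAIM (what is proved, stated in full; the proofs are below) =====
def Claim_equal_decode_checkerboard : Prop := ∀ (content : List (List String)), Dom_decode_checkerboard content → Pre_decode_checkerboard content → Spec_decode_checkerboard content (decode_checkerboard content)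

-- ===== LEMMAS AND PROOFS =====
theorem pvChunk3_short (xs : List (String × String)) (h : xs.length < 3) : pvChunk3 xs = [] := by
  rw [pvChunk3]; simp [Nat.not_le.mpr h]

theorem pvChunk3_cons3 (a b c : String × String) (rest : List (String × String)) :
    pvChunk3 (a :: b :: c :: rest) = [a, b, c] :: pvChunk3 rest := by
  rw [pvChunk3]; simp

-- loop invariant: from a partial row 'per' with counter = per.length < 3, A's fold produces
-- 'board' followed by the 3-chunks of per ++ the decoded remaining lines
theorem pvFoldA (content : List (List String)) :
    ∀ (board : List (List (String × String))) (per : List (String × String)),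
    per.length < 3 →
    (content.foldl
      (fun (s : List (List (String × String)) × Int × List (String × String)) line =>
        let x := PySem.Str.lower (PySem.List.pyGetD line (-2) "")
        let y := if PySem.List.pyGetD line (-1) "" = "False" then ""
                 else PySem.Str.lower (PySem.List.pyGetD line (-1) "")
        let per := s.2.2 ++ [(x, y)]
        let counter := s.2.1 + 1
        if counter = 3 then (s.1 ++ [per], 0, ([] : List (String × String)))
        else (s.1, counter, per))
      (board, (per.length : Int), per)).1
    = board ++ pvChunk3 (per ++ content.map pvDecodeLine) := by
  induction content with
  | nil =>
    intro board per hlt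
    simp [List.foldl, pvChunk3_short per hlt]
  | cons line rest ih =>
    intro board per hlt
    simp only [List.foldl, List.map]
    by_cases h2 : per.length = 2
    · obtain ⟨a, b, hper⟩ : ∃ a b, per = [a, b] := by
        match per, h2 with
        | [a, b], _ => exact ⟨a, b, rfl⟩
      have hc : ((per.length : Int) + 1 = 3) := by omega
      have := ih (board ++ [per ++ [pvDecodeLine line]]) [] (by simp)
      simp only [List.length_nil, Nat.cast_zero, List.nil_append] at this
      subst hper
      simpa [hc, pvDecodeLine, pvChunk3_cons3] using this
    · have hc : ¬ ((per.length : Int) + 1 = 3) := by omega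
      have hlen : (per ++ [pvDecodeLine line]).length < 3 := by simp; omega
      have := ih board (per ++ [pvDecodeLine line]) hlen
      push_cast at this
      simpa [hc, pvDecodeLine] using this

-- ===== VERDICT (by name: the statement is the Claim_ definition above) =====
theorem decode_checkerboard_spec : Claim_equal_decode_checkerboard := by
  intro content _ _
  unfold Spec_decode_checkerboard decode_checkerboard decode_checkerboard_alt
  have := pvFoldA content [] [] (by simp)
  simpa using this
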